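-- pv_equiv track=rewrite | github.com/World-Ablaze/world-ablaze-beta | tools/ai_replacer_base/tech_graph.py | _get_special_forces_type
-- ===== SOURCE A (Python) =====
-- from typing import Optional
--
-- def _get_special_forces_type(triggers: list[str]) -> Optional[str]:
--     """
--     Determine if triggers represent a single special forces type.
--
--     Returns:
--         The SF type if exactly one type, None otherwise
--     """
--     sf_types = []
--     for trigger in triggers:
--         trigger_lower = trigger.lower()
--         if 'paratrooper' in trigger_lower:
--             sf_types.append('paratroopers')
--         elif 'marine' in trigger_lower:
--             sf_types.append('marines')
--         elif 'mountaineer' in trigger_lower: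
--             sf_types.append('mountaineers')
--
--     if len(set(sf_types)) == 1:
--         return sf_types[0]
--     return None
-- ===== SOURCE B (Python) =====
-- from typing import Optional
--
-- def _category(trigger: str) -> Optional[str]:
--     t = trigger.lower()
--     if 'paratrooper' in t:
--         return 'paratroopers'
--     if 'marine' in t:
--         return 'marines'
--     if 'mountaineer' in t:
--         return 'mountaineers'
--     return None
--
-- def _get_special_forces_type(triggers: list[str]) -> Optional[str]:
--     candidate = None
--     for trigger in triggers:
--         c = _category(trigger)
--         if c is None:
--             continue
--         if candidate is None:
--             candidate = c
--         elif c != candidate: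
--             return None
--     return candidate
-- ===== Notes on version B (the rewrite author's own statement) =====
-- stated objective: simpler
-- what changed: Single scan keeping one scalar candidate with early exit on a second distinct type, instead of materialising a list of all matches and testing set cardinality at the end.
import Mathlib
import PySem

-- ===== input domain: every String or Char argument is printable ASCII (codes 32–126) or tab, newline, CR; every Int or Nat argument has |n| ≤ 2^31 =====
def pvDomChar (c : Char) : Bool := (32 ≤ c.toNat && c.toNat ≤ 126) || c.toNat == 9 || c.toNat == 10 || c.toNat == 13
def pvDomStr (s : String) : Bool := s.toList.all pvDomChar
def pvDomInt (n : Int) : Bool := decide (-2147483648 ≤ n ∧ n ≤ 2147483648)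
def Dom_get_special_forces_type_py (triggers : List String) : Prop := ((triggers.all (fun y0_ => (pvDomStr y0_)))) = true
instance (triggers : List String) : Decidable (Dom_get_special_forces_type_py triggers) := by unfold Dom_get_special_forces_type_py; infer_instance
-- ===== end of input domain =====

-- B keeps a single scalar candidate with early exit on a second distinct type, instead of
-- collecting all matches in a list and testing set cardinality at the end (simpler, same cost).

-- ===== PORT A =====
def get_special_forces_type_py (triggers : List String) : Option String :=
  let sf_types := triggers.foldl (fun acc trigger =>
    let trigger_lower := PySem.Str.lower trigger
    if PySem.Str.isIn "paratrooper" trigger_lower then acc ++ ["paratroopers"]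
    else if PySem.Str.isIn "marine" trigger_lower then acc ++ ["marines"]
    else if PySem.Str.isIn "mountaineer" trigger_lower then acc ++ ["mountaineers"]
    else acc) []
  if (PySem.Set.ofList sf_types).length = 1 then PySem.List.pyGet? sf_types 0
  else none

-- ===== PORT B =====
def pvCategory (trigger : String) : Option String :=
  let t := PySem.Str.lower trigger
  if PySem.Str.isIn "paratrooper" t then some "paratroopers"
  else if PySem.Str.isIn "marine" t then some "marines"
  else if PySem.Str.isIn "mountaineer" t then some "mountaineers"
  else none

def pvLoop : List String → Option String → Option String
  | [], candidate => candidate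
  | trigger :: rest, candidate =>
    match pvCategory trigger, candidate with
    | none, _ => pvLoop rest candidate
    | some c, none => pvLoop rest (some c)
    | some c, some c0 => if c = c0 then pvLoop rest (some c0) else none

def get_special_forces_type_py_alt (triggers : List String) : Option String :=
  pvLoop triggers none

-- ===== PRECONDITION & SPEC =====
def Spec_get_special_forces_type_py (triggers : List String) (out : Option String) : Prop := out = get_special_forces_type_py_alt triggers
instance (triggers : List String) (out : Option String) : Decidable (Spec_get_special_forces_type_py triggers out) := by unfold Spec_get_special_forces_type_py; infer_instance

-- ===== CLAIM (what is proved, stated in full; the proofs are below) =====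
def Claim_equal_get_special_forces_type_py : Prop := ∀ (triggers : List String), Dom_get_special_forces_type_py triggers → Spec_get_special_forces_type_py triggers (get_special_forces_type_py triggers)

-- ===== LEMMAS AND PROOFS =====

-- A's per-trigger step appends exactly B's category (if any)
def pvStep (acc : List String) (trigger : String) : List String :=
  let trigger_lower := PySem.Str.lower trigger
  if PySem.Str.isIn "paratrooper" trigger_lower then acc ++ ["paratroopers"]
  else if PySem.Str.isIn "marine" trigger_lower then acc ++ ["marines"]
  else if PySem.Str.isIn "mountaineer" trigger_lower then acc ++ ["mountaineers"]
  else acc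

theorem pvStep_eq (acc : List String) (t : String) :
    pvStep acc t = match pvCategory t with
      | none => acc
      | some c => acc ++ [c] := by
  unfold pvStep pvCategory
  dsimp only
  split_ifs <;> rfl

-- A's final test on the accumulated list
def pvVerdict (sf : List String) : Option String :=
  if (PySem.Set.ofList sf).length = 1 then PySem.List.pyGet? sf 0 else none

theorem pvOfList_const (c : String) (l : List String) (h : ∀ x ∈ l, x = c) :
    PySem.Set.ofList (c :: l) = [c] := by
  induction l with
  | nil => rfl
  | cons a rest ih =>
      have ha : a = c := h a (by simp)
      subst ha
      have : PySem.Set.ofList (a :: a :: rest) = PySem.Set.ofList (a :: rest) := by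
        simp [PySem.Set.ofList, PySem.Set.add, PySem.Set.contains, List.foldl]
      rw [this]
      exact ih (fun x hx => h x (by simp [hx]))

theorem pvOfList_append (l : List String) (x : String) :
    PySem.Set.ofList (l ++ [x]) = PySem.Set.add (PySem.Set.ofList l) x := by
  simp [PySem.Set.ofList_eq_foldl, List.foldl_append, List.foldl]

theorem pvSet_len_mono (l : List String) (x : String) :
    (PySem.Set.ofList l).length ≤ (PySem.Set.ofList (l ++ [x])).length := by
  rw [pvOfList_append]
  unfold PySem.Set.add
  split <;> simp

-- once the accumulator's set has ≥ 2 elements A's verdict is none, whatever follows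
theorem pvVerdict_big (ts : List String) (acc : List String)
    (h : 2 ≤ (PySem.Set.ofList acc).length) :
    pvVerdict (ts.foldl pvStep acc) = none := by
  induction ts generalizing acc with
  | nil =>
      unfold pvVerdict
      have hne : (PySem.Set.ofList acc).length ≠ 1 := by omega
      simp [List.foldl_nil, hne]
  | cons t rest ih =>
      simp only [List.foldl]
      rw [pvStep_eq]
      cases hc : pvCategory t with
      | none => exact ih acc h
      | some c =>
          exact ih (acc ++ [c]) (le_trans h (pvSet_len_mono acc c))

-- main invariant: accumulator nonempty with all elements = c  ↔  B's candidate is some c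
theorem pvMain_some (ts : List String) (c : String) (acc : List String)
    (hne : acc ≠ []) (hall : ∀ x ∈ acc, x = c) :
    pvVerdict (ts.foldl pvStep acc) = pvLoop ts (some c) := by
  induction ts generalizing acc with
  | nil =>
      cases acc with
      | nil => exact absurd rfl hne
      | cons a l =>
          have ha : a = c := hall a (by simp)
          subst ha
          have hset : PySem.Set.ofList (a :: l) = [a] :=
            pvOfList_const a l (fun x hx => hall x (by simp [hx]))
          unfold pvVerdict pvLoop
          simp only [List.foldl_nil]
          rw [hset]
          simp [PySem.List.pyGet?, PySem.List.pyIdx?]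
  | cons t rest ih =>
      simp only [List.foldl]
      rw [pvStep_eq]
      cases hc : pvCategory t with
      | none => simp only [pvLoop, hc]; exact ih acc hne hall
      | some c' =>
          simp only [pvLoop, hc]
          by_cases hcc : c' = c
          · subst hcc
            rw [if_pos rfl]
            exact ih (acc ++ [c']) (by simp) (by
              intro x hx
              rcases List.mem_append.mp hx with h1 | h1
              · exact hall x h1
              · simpa using h1)
          · rw [if_neg hcc]
            apply pvVerdict_big
            cases acc with
            | nil => exact absurd rfl hne
            | cons a l =>
                have ha : a = c := hall a (by simp)
                subst ha
                have hset : PySem.Set.ofList (a :: l) = [a] :=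
                  pvOfList_const a l (fun x hx => hall x (by simp [hx]))
                have : (a :: l) ++ [c'] = a :: (l ++ [c']) := by simp
                rw [this]
                have h2 : PySem.Set.ofList ((a :: (l ++ [c']))) =
                    PySem.Set.add (PySem.Set.ofList (a :: l)) c' := by
                  have := pvOfList_append (a :: l) c'
                  simpa using this
                rw [h2, hset]
                unfold PySem.Set.add PySem.Set.contains
                have : c' ≠ a := hcc
                simp [this]

theorem pvMain_none (ts : List String) :
    pvVerdict (ts.foldl pvStep []) = pvLoop ts none := by
  induction ts with
  | nil => rfl
  | cons t rest ih =>
      simp only [List.foldl]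
      rw [pvStep_eq]
      cases hc : pvCategory t with
      | none => simp only [pvLoop, hc]; simpa using ih
      | some c =>
          simp only [pvLoop, hc]
          exact pvMain_some rest c [c] (by simp) (by simp)

-- ===== VERDICT (by name: the statement is the Claim_ definition above) =====
theorem get_special_forces_type_py_spec : Claim_equal_get_special_forces_type_py := by
  intro triggers _
  unfold Spec_get_special_forces_type_py get_special_forces_type_py get_special_forces_type_py_alt
  exact pvMain_none triggers
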